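-- pv_equiv track=rewrite | github.com/Sapoteo/pydoku | pydokulib.py | generate_possible_lists
-- ===== SOURCE A (Python) =====
-- def generate_possible_lists(list_len, upper_bound=9, lower_bound=1, allowed_values = None):
--     '''
--     generate_possible_lists(list_len, upper_bound = 9, lower_bound = 1, allowed_values = None)
--
--     Returns a list with all possible lists of size list_len
--
--     Parameters
--     ----------
--     list_len: int
--         Integer that gives the generated lists sizes.
--     upper_bound: int
--         TODO: descriptions
--     lower_bound: int
--     allowed_vallues: list
--     '''
--
--     possible_lists = []
--     if allowed_values is None:
--         values = range(lower_bound,upper_bound+1)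
--     else:
--         values = allowed_values
--
--     values_len = len(values)
--
--     for i in range(values_len**list_len):
--         temp_list = []
--         for j in range(list_len):
--             temp_list.append(values[(i//(values_len**j))%values_len]) # TODO fix index
--         possible_lists.append(temp_list)
--
--     return possible_lists
-- ===== SOURCE B (Python) =====
-- def generate_possible_lists(list_len, upper_bound=9, lower_bound=1, allowed_values=None):
--     '''Build the Cartesian product iteratively: start from the single empty list and,
--     list_len times, prepend every value to every list built so far (position 0 varies fastest).'''
--     if allowed_values is None:
--         values = list(range(lower_bound, upper_bound + 1))
--     else:
--         values = allowed_values
--     result = [[]]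
--     for _ in range(list_len):
--         result = [[v] + rest for rest in result for v in values]
--     return result
-- ===== Notes on version B (the rewrite author's own statement) =====
-- stated objective: idiomatic
-- what changed: Replaces the per-cell index arithmetic (values[(i // values_len**j) % values_len] for every cell of every one of values_len**list_len rows) by an incremental Cartesian product: start from [[]] and, list_len times, prepend every value to every list built so far.
import Mathlib
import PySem

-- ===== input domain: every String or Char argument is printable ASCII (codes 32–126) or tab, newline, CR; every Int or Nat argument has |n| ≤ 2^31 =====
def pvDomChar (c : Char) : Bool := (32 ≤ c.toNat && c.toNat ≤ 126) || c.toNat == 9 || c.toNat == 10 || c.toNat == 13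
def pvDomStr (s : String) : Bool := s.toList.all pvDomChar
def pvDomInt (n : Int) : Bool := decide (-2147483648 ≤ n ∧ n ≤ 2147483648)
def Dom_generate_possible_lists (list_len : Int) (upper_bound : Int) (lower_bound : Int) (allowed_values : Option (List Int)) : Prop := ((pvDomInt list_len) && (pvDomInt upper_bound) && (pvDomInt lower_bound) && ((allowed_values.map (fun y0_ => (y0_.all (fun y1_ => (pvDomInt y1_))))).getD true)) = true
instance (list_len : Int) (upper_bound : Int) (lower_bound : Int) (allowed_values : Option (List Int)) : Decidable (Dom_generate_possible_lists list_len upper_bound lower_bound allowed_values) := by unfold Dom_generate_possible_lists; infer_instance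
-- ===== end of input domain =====

-- B replaces A's per-cell index arithmetic by an incremental Cartesian product (prepend every
-- value to every list built so far, list_len times); same output, idiomatic rather than faster.


-- ===== PORT A =====
def generate_possible_lists (list_len : Int) (upper_bound : Int) (lower_bound : Int) (allowed_values : Option (List Int)) : List (List Int) :=
  let values : List Int :=
    match allowed_values with
    | none => PySem.List.pyRange lower_bound (upper_bound + 1) 1
    | some l => l
  let values_len : Int := (values.length : Int)
  -- 'values_len ** list_len': exponent taken as a Nat; faithful under Pre_ (0 ≤ list_len)
  (PySem.List.pyRange 0 (values_len ^ list_len.toNat) 1).foldl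
    (fun possible_lists i =>
      possible_lists ++
        [(PySem.List.pyRange 0 list_len 1).foldl
          (fun temp_list j =>
            temp_list ++
              [PySem.List.pyGetD values
                (PySem.Int.mod (PySem.Int.floordiv i (values_len ^ j.toNat)) values_len) 0])
          []])
    []

-- ===== PORT B =====
def generate_possible_lists_alt (list_len : Int) (upper_bound : Int) (lower_bound : Int) (allowed_values : Option (List Int)) : List (List Int) :=
  let values : List Int :=
    match allowed_values with
    | none => PySem.List.pyRange lower_bound (upper_bound + 1) 1
    | some l => l
  (PySem.List.pyRange 0 list_len 1).foldl
    (fun result _ => result.flatMap (fun rest => values.map (fun v => v :: rest)))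
    [[]]

-- ===== PRECONDITION & SPEC =====
-- Pre_ excludes exactly negative list_len, where Python A raises (TypeError on range() of a
-- float, or ZeroDivisionError when the value set is empty).
def Pre_generate_possible_lists (list_len : Int) (upper_bound : Int) (lower_bound : Int) (allowed_values : Option (List Int)) : Prop :=
  0 ≤ list_len
instance (list_len : Int) (upper_bound : Int) (lower_bound : Int) (allowed_values : Option (List Int)) : Decidable (Pre_generate_possible_lists list_len upper_bound lower_bound allowed_values) := by unfold Pre_generate_possible_lists; infer_instance

def pvWitness_generate_possible_lists : Int × Int × Int × Option (List Int) := (2, 3, 1, none)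

def Spec_generate_possible_lists (list_len : Int) (upper_bound : Int) (lower_bound : Int) (allowed_values : Option (List Int)) (out : List (List Int)) : Prop := out = generate_possible_lists_alt list_len upper_bound lower_bound allowed_values
instance (list_len : Int) (upper_bound : Int) (lower_bound : Int) (allowed_values : Option (List Int)) (out : List (List Int)) : Decidable (Spec_generate_possible_lists list_len upper_bound lower_bound allowed_values out) := by unfold Spec_generate_possible_lists; infer_instance

-- ===== CLAIM (what is proved, stated in full; the proofs are below) =====
def Claim_equal_generate_possible_lists : Prop := ∀ (list_len : Int) (upper_bound : Int) (lower_bound : Int) (allowed_values : Option (List Int)), Dom_generate_possible_lists list_len upper_bound lower_bound allowed_values → Pre_generate_possible_lists list_len upper_bound lower_bound allowed_values → Spec_generate_possible_lists list_len upper_bound lower_bound allowed_values (generate_possible_lists list_len upper_bound lower_bound allowed_values)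

-- ===== LEMMAS AND PROOFS =====

-- Mathematical middle ground: A's row-by-index enumeration and B's iterated product, over Nat.
def pvRow (values : List Int) (n i : Nat) : List Int :=
  (List.range n).map (fun j => values.getD ((i / values.length ^ j) % values.length) 0)

def pvAll (values : List Int) (n : Nat) : List (List Int) :=
  (List.range (values.length ^ n)).map (pvRow values n)

def pvStep (values : List Int) (R : List (List Int)) : List (List Int) :=
  R.flatMap (fun rest => values.map (fun v => v :: rest))

def pvIter (values : List Int) : Nat → List (List Int)
  | 0 => [[]]
  | n + 1 => pvStep values (pvIter values n)

lemma range_mul_flatMap {α : Type} (a b : Nat) (g : Nat → α) :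
    (List.range (a * b)).map g
      = (List.range a).flatMap (fun q => (List.range b).map (fun r => g (q * b + r))) := by
  induction a with
  | zero => simp
  | succ a ih =>
    have h : (a + 1) * b = a * b + b := by ring
    rw [h, List.range_add, List.map_append, ih, List.range_succ, List.flatMap_append]
    simp [List.map_map, Function.comp]

lemma pvRow_succ (values : List Int) (n q r : Nat) (hr : r < values.length) :
    pvRow values (n + 1) (q * values.length + r) = values.getD r 0 :: pvRow values n q := by
  have hvl : 0 < values.length := by omega
  have hdiv : (q * values.length + r) / values.length = q := by
    rw [Nat.mul_comm, Nat.mul_add_div hvl, Nat.div_eq_of_lt hr, Nat.add_zero]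
  unfold pvRow
  rw [List.range_succ_eq_map, List.map_cons, List.map_map]
  congr 1
  · simp [Nat.mod_eq_of_lt hr]
  · apply List.map_congr_left
    intro j _
    have hkey : (q * values.length + r) / values.length ^ (j + 1) = q / values.length ^ j := by
      rw [pow_succ' (M := ℕ), ← Nat.div_div_eq_div_mul, hdiv]
    simp [Function.comp, hkey]

lemma pvMap_getD {β : Type} (xs : List Int) (f : Int → β) :
    (List.range xs.length).map (fun r => f (xs.getD r 0)) = xs.map f := by
  apply List.ext_getElem
  · simp
  · intro i h1 h2
    simp at h1
    simp [List.getD_eq_getElem?_getD, List.getElem?_eq_getElem h1]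

lemma pvAll_zero (values : List Int) : pvAll values 0 = [[]] := by
  simp [pvAll, pvRow]

lemma pvAll_succ (values : List Int) (n : Nat) :
    pvAll values (n + 1) = pvStep values (pvAll values n) := by
  unfold pvAll pvStep
  rw [pow_succ, range_mul_flatMap, List.flatMap_map]
  apply List.flatMap_congr
  intro q hq
  conv_rhs => rw [← pvMap_getD values (fun v => v :: pvRow values n q)]
  apply List.map_congr_left
  intro r hr
  exact pvRow_succ values n q r (List.mem_range.mp hr)

lemma pvAll_eq_iter (values : List Int) (n : Nat) : pvAll values n = pvIter values n := by
  induction n with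
  | zero => simpa [pvIter] using pvAll_zero values
  | succ n ih => rw [pvAll_succ, ih]; rfl

-- Port A computes pvAll.
lemma portA_eq (values : List Int) (n : Nat) :
    (PySem.List.pyRange 0 (((values.length : Int)) ^ n) 1).foldl
      (fun possible_lists i =>
        possible_lists ++
          [(PySem.List.pyRange 0 (n : Int) 1).foldl
            (fun temp_list j =>
              temp_list ++
                [PySem.List.pyGetD values
                  (PySem.Int.mod (PySem.Int.floordiv i (((values.length : Int)) ^ j.toNat)) ((values.length : Int))) 0])
            []])
      []
      = pvAll values n := by
  have hfd : ∀ (k jn : Nat), PySem.Int.mod (PySem.Int.floordiv (k : Int) (((values.length : Int)) ^ jn)) ((values.length : Int)) = ((k / values.length ^ jn % values.length : Nat) : Int) := by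
    intro k jn
    rw [← Nat.cast_pow, PySem.Int.floordiv_natCast, PySem.Int.mod_natCast]
  simp only [PySem.List.foldl_append_singleton_eq_map, List.nil_append]
  rw [PySem.List.pyRange_one 0 (((values.length : Int)) ^ n), PySem.List.pyRange_one 0 (n : Int)]
  unfold pvAll pvRow
  have hN : ((((values.length : Int)) ^ n - 0).toNat) = values.length ^ n := by
    rw [sub_zero, ← Nat.cast_pow, Int.toNat_natCast]
  have hn0 : (((n : Int)) - 0).toNat = n := by omega
  rw [hN, hn0, List.map_map]
  apply List.map_congr_left
  intro k _
  simp only [Function.comp, zero_add, List.map_map]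
  apply List.map_congr_left
  intro j _
  simp only [Function.comp_apply, Int.toNat_natCast]
  rw [hfd k j, PySem.List.pyGetD_natCast]

-- Port B computes pvIter.
lemma portB_eq (values : List Int) (n : Nat) :
    (PySem.List.pyRange 0 (n : Int) 1).foldl
      (fun result _ => result.flatMap (fun rest => values.map (fun v => v :: rest)))
      [[]]
      = pvIter values n := by
  induction n with
  | zero => simp [pvIter]
  | succ n ih =>
    have h : ((n : Int) + 1) = ((n + 1 : Nat) : Int) := by push_cast; ring
    rw [← h, PySem.List.pyRange_one_succ_right (by positivity), List.foldl_append]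
    simp [ih, pvIter, pvStep]

-- ===== VERDICT (by name: the statement is the Claim_ definition above) =====
theorem generate_possible_lists_spec : Claim_equal_generate_possible_lists := by
  intro list_len upper_bound lower_bound allowed_values _ hpre
  obtain ⟨n, rfl⟩ : ∃ m : Nat, list_len = (m : Int) := ⟨list_len.toNat, (Int.toNat_of_nonneg hpre).symm⟩
  unfold Spec_generate_possible_lists generate_possible_lists generate_possible_lists_alt
  cases allowed_values <;>
    exact (portA_eq _ n).trans ((pvAll_eq_iter _ n).trans (portB_eq _ n).symm)
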